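-- pv_equiv track=rewrite | github.com/PotatoesMakeChips/2022-UoP-Secrypt | Lab2/DictionaryAttack.py | LetterFreq
-- ===== SOURCE A (Python) =====
-- def LetterFreq(cypherTextIn):
--     letterFreq = {}
--     letters = ["Z","Y","X","W","V","U","T","S","R","Q","P","O","N","M","L","K","J","I","H","G","F","E","D","C","B","A"]
--     output = []
--     words = cypherTextIn.split(" ")
--     for word in words:
--         for letter in word:
--             if letter not in letterFreq.keys():
--                 letterFreq[letter] = letters.pop()
--     stageOutput = []
--     for word in words:
--         for letter in word:
--             stageOutput.append(letterFreq[letter])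
--         output.append(''.join(stageOutput))
--         stageOutput = []
--     return output
-- ===== SOURCE B (Python) =====
-- def LetterFreq(cypherTextIn):
--     # Single pass: build the substitution mapping and the encoded output in the
--     # same traversal (A builds the whole mapping first, then re-walks all words).
--     letterFreq = {}
--     letters = ["Z","Y","X","W","V","U","T","S","R","Q","P","O","N","M","L","K","J","I","H","G","F","E","D","C","B","A"]
--     output = []
--     for word in cypherTextIn.split(" "):
--         encoded = []
--         for letter in word:
--             if letter not in letterFreq:
--                 letterFreq[letter] = letters.pop()
--             encoded.append(letterFreq[letter])
--         output.append(''.join(encoded))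
--     return output
-- ===== Notes on version B (the rewrite author's own statement) =====
-- stated objective: simpler
-- what changed: Fuses A's two passes (build the whole first-appearance mapping over all words, then re-walk all words to encode) into a single traversal that extends the mapping and emits each word's encoding as it goes; one traversal instead of two.
import Mathlib
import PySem

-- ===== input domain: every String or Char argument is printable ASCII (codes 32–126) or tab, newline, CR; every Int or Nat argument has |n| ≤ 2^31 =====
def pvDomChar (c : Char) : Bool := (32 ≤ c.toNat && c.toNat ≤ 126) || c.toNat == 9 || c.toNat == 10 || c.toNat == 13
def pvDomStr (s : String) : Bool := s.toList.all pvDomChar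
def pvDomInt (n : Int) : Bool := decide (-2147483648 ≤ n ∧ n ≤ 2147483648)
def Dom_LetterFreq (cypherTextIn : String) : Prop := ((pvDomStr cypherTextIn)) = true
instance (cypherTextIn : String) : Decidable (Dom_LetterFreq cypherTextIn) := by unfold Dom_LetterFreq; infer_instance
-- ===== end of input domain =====

-- B fuses A's two passes (build the whole mapping, then re-encode) into one traversal that maps and encodes together; same result, simpler flow.

-- ===== PORT A =====
-- Python's letters.pop() raises IndexError when letters is empty; the port reads getLastD ""
-- there, and Pre_LetterFreq excludes exactly the inputs (>26 distinct non-space chars) that reach it.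
def pvLetters : List String :=
  ["Z","Y","X","W","V","U","T","S","R","Q","P","O","N","M","L","K","J","I","H","G","F","E","D","C","B","A"]

-- body of A's pass-1 inner loop (one letter)
def aStep (st : PySem.Dict Char String × List String) (letter : Char) :
    PySem.Dict Char String × List String :=
  if st.1.contains letter then st
  else (st.1.insert letter (st.2.getLastD ""), st.2.dropLast)

-- A's pass-1 processing of one word
def aWord (st : PySem.Dict Char String × List String) (word : String) :
    PySem.Dict Char String × List String :=
  word.toList.foldl aStep st

def LetterFreq (cypherTextIn : String) : List String :=
  let words := (PySem.Str.split? cypherTextIn " ").getD []   -- " " ≠ "", so split? is always some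
  -- first pass: build the whole letterFreq table
  let st := words.foldl aWord ((PySem.Dict.empty : PySem.Dict Char String), pvLetters)
  let letterFreq := st.1
  -- second pass: re-encode every word with the finished table
  words.foldl (fun output word =>
      output ++ [PySem.Str.join ""
        (word.toList.foldl (fun stageOutput letter => stageOutput ++ [letterFreq.getD letter ""]) [])])
    []

-- ===== PORT B =====
-- body of B's inner loop: extend the mapping if needed, emit the letter's code
def bStep (st : PySem.Dict Char String × List String × List String) (letter : Char) :
    PySem.Dict Char String × List String × List String :=
  let m' := if st.1.contains letter then (st.1, st.2.1)
            else (st.1.insert letter (st.2.1.getLastD ""), st.2.1.dropLast)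
  (m'.1, m'.2, st.2.2 ++ [m'.1.getD letter ""])

-- B's single-pass processing of one word: encode it while growing the mapping, append the joined word
def bWord (st : PySem.Dict Char String × List String × List String) (word : String) :
    PySem.Dict Char String × List String × List String :=
  let inner := word.toList.foldl bStep (st.1, st.2.1, [])
  (inner.1, inner.2.1, st.2.2 ++ [PySem.Str.join "" inner.2.2])

def LetterFreq_alt (cypherTextIn : String) : List String :=
  let words := (PySem.Str.split? cypherTextIn " ").getD []   -- " " ≠ "", so split? is always some
  (words.foldl bWord ((PySem.Dict.empty : PySem.Dict Char String), pvLetters, [])).2.2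

-- ===== PRECONDITION & SPEC =====
-- Pre_ excludes exactly the inputs with more than 26 distinct non-space characters,
-- on which the Python A (and B) raises IndexError from letters.pop().
def Pre_LetterFreq (cypherTextIn : String) : Prop :=
  (PySem.Set.ofList (cypherTextIn.toList.filter (fun c => c ≠ ' '))).length ≤ 26
instance (cypherTextIn : String) : Decidable (Pre_LetterFreq cypherTextIn) := by
  unfold Pre_LetterFreq; infer_instance
def pvWitness_LetterFreq : String := "HELLO WORLD"

def Spec_LetterFreq (cypherTextIn : String) (out : List String) : Prop := out = LetterFreq_alt cypherTextIn
instance (cypherTextIn : String) (out : List String) : Decidable (Spec_LetterFreq cypherTextIn out) := by unfold Spec_LetterFreq; infer_instance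

-- ===== CLAIM (what is proved, stated in full; the proofs are below) =====
def Claim_equal_LetterFreq : Prop := ∀ (cypherTextIn : String), Dom_LetterFreq cypherTextIn → Pre_LetterFreq cypherTextIn → Spec_LetterFreq cypherTextIn (LetterFreq cypherTextIn)

-- ===== LEMMAS AND PROOFS =====

-- a contained key's get? is some of its getD
lemma pvContains_get? (d : PySem.Dict Char String) (k : Char) (h : d.contains k = true) :
    d.get? k = some (d.getD k "") := by
  rw [PySem.Dict.contains_eq_isSome_get?] at h
  cases hg : d.get? k with
  | none => rw [hg] at h; simp at h
  | some v => simp [PySem.Dict.getD_eq_get?_getD, hg]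

-- aStep never changes an existing entry
lemma pvStep_preserve (st : PySem.Dict Char String × List String) (c k : Char) (v : String)
    (h : st.1.get? k = some v) : (aStep st c).1.get? k = some v := by
  unfold aStep
  by_cases hc : st.1.contains c = true
  · simp [hc, h]
  · have hne : k ≠ c := by
      intro he; subst he
      rw [PySem.Dict.contains_eq_isSome_get?, h] at hc; simp at hc
    simpa [hc, PySem.Dict.get?_insert_of_ne _ _ hne] using h

lemma pvFold_preserve (cs : List Char) (st : PySem.Dict Char String × List String)
    (k : Char) (v : String) (h : st.1.get? k = some v) :
    (cs.foldl aStep st).1.get? k = some v := by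
  induction cs generalizing st with
  | nil => exact h
  | cons c cs ih => exact ih _ (pvStep_preserve st c k v h)

lemma pvWords_preserve (ws : List String) (st : PySem.Dict Char String × List String)
    (k : Char) (v : String) (h : st.1.get? k = some v) :
    (ws.foldl aWord st).1.get? k = some v := by
  induction ws generalizing st with
  | nil => exact h
  | cons w ws ih => exact ih _ (pvFold_preserve _ st k v h)

-- after processing c, the key c is present, with the value aStep reports
lemma pvStep_self (st : PySem.Dict Char String × List String) (c : Char) :
    (aStep st c).1.get? c = some ((aStep st c).1.getD c "") := by
  unfold aStep
  by_cases hc : st.1.contains c = true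
  · simpa [hc] using pvContains_get? st.1 c hc
  · simp [hc, PySem.Dict.get?_insert_self, PySem.Dict.getD_eq_get?_getD]

-- every char of cs is present after folding aStep over cs
lemma pvFold_mem (cs : List Char) (st : PySem.Dict Char String × List String)
    (c : Char) (hc : c ∈ cs) :
    (cs.foldl aStep st).1.get? c = some ((cs.foldl aStep st).1.getD c "") := by
  induction cs generalizing st with
  | nil => cases hc
  | cons d ds ih =>
    rcases List.mem_cons.mp hc with h | h
    · subst h
      have h1 := pvFold_preserve ds (aStep st c) c ((aStep st c).1.getD c "") (pvStep_self st c)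
      simp [List.foldl_cons, PySem.Dict.getD_eq_get?_getD, h1]
    · exact ih _ h

-- one bStep = one aStep plus the emitted code
lemma pvBStep_eq (m : PySem.Dict Char String) (ls buf : List String) (c : Char) :
    bStep (m, ls, buf) c
      = ((aStep (m, ls) c).1, (aStep (m, ls) c).2, buf ++ [(aStep (m, ls) c).1.getD c ""]) := by
  by_cases hc : m.contains c = true <;> simp [bStep, aStep, hc]

-- B's inner loop = A's pass-1 word fold plus the word encoded under the state after the word
lemma pvInner_spec (w : List Char) (m : PySem.Dict Char String) (ls buf : List String) :
    w.foldl bStep (m, ls, buf)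
      = ((w.foldl aStep (m, ls)).1, (w.foldl aStep (m, ls)).2,
          buf ++ w.map (fun c => (w.foldl aStep (m, ls)).1.getD c "")) := by
  induction w generalizing m ls buf with
  | nil => simp
  | cons c cs ih =>
    rw [List.foldl_cons, pvBStep_eq]
    rcases hst : aStep (m, ls) c with ⟨m1, ls1⟩
    rw [ih]
    have hval : (cs.foldl aStep (m1, ls1)).1.getD c "" = (aStep (m, ls) c).1.getD c "" := by
      have h1 := pvFold_preserve cs (aStep (m, ls) c) c
        ((aStep (m, ls) c).1.getD c "") (pvStep_self (m, ls) c)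
      rw [hst] at h1
      simp [PySem.Dict.getD_eq_get?_getD, h1, hst]
    rw [List.foldl_cons, hst]
    simp [hval, hst]

-- a word's codes are unchanged by processing later words
lemma pvEncode_stable (w : String) (st : PySem.Dict Char String × List String)
    (ws : List String) :
    w.toList.map (fun c => (aWord st w).1.getD c "")
      = w.toList.map (fun c => (ws.foldl aWord (aWord st w)).1.getD c "") := by
  apply List.map_congr_left
  intro c hc
  have h1 : (aWord st w).1.get? c = some ((aWord st w).1.getD c "") := pvFold_mem w.toList st c hc
  have h2 := pvWords_preserve ws (aWord st w) c ((aWord st w).1.getD c "") h1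
  simp [PySem.Dict.getD_eq_get?_getD, h2]

-- one bWord = one aWord plus the word encoded (codes as of the end of this word)
lemma pvBWord_eq (m : PySem.Dict Char String) (ls out : List String) (w : String) :
    bWord (m, ls, out) w
      = ((aWord (m, ls) w).1, (aWord (m, ls) w).2,
          out ++ [PySem.Str.join "" (w.toList.map (fun c => (aWord (m, ls) w).1.getD c ""))]) := by
  unfold bWord
  rw [show ((m, ls, out) : PySem.Dict Char String × List String × List String).2.2 = out from rfl,
      show ((m, ls, out) : PySem.Dict Char String × List String × List String).1 = m from rfl]
  rw [show ((m, ls, out) : PySem.Dict Char String × List String × List String).2.1 = ls from rfl]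
  rw [pvInner_spec]
  rfl

-- B's outer loop: final mapping = A's pass-1 fold, output = words encoded under the final mapping
lemma pvOuter_spec (ws : List String) (m : PySem.Dict Char String) (ls out : List String) :
    ws.foldl bWord (m, ls, out)
      = ((ws.foldl aWord (m, ls)).1, (ws.foldl aWord (m, ls)).2,
          out ++ ws.map (fun w => PySem.Str.join ""
            (w.toList.map (fun c => (ws.foldl aWord (m, ls)).1.getD c "")))) := by
  induction ws generalizing m ls out with
  | nil => simp
  | cons w ws ih =>
    rw [List.foldl_cons, pvBWord_eq]
    rcases hst : aWord (m, ls) w with ⟨m1, ls1⟩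
    rw [ih]
    have hw := pvEncode_stable w (m, ls) ws
    rw [hst] at hw
    rw [List.foldl_cons, hst]
    simp [hw]

theorem pvMain (s : String) : LetterFreq s = LetterFreq_alt s := by
  unfold LetterFreq LetterFreq_alt
  dsimp only
  rw [pvOuter_spec]
  simp only [PySem.List.foldl_append_singleton_eq_map, List.nil_append]

-- ===== VERDICT (by name: the statement is the Claim_ definition above) =====
theorem LetterFreq_spec : Claim_equal_LetterFreq := by
  intro s _ _
  unfold Spec_LetterFreq
  exact pvMain s
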